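-- pv_equiv track=rewrite | github.com/mpetteno/aoc | editions/2024/day2/solution.py | get_lis
-- ===== SOURCE A (Python) =====
-- def get_lis(sequence):
--     n = len(sequence)
--     dp = [1] * n
--     for i in range(1, n):
--         for j in range(i):
--             abs_distance = abs(int(sequence[i]) - int(sequence[j]))
--             if int(sequence[j]) < int(sequence[i]) and 1 <= abs_distance <= 3:
--                 dp[i] = max(dp[i], dp[j] + 1)
--     return max(dp)
-- ===== SOURCE B (Python) =====
-- def get_lis(sequence):
--     best = {}
--     ans = 0
--     for v in sequence:
--         d = max(best.get(v - 1, 0), best.get(v - 2, 0), best.get(v - 3, 0)) + 1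
--         nb = max(best.get(v, 0), d)
--         best[v] = nb
--         ans = max(ans, nb)
--     return ans
-- ===== Notes on version B (the rewrite author's own statement) =====
-- stated objective: faster
-- what changed: Replaces the quadratic index-pair DP with a single pass keeping a dict value->best-chain-length and looking up only v-1, v-2, v-3 per element.
-- outside the precondition, e.g. on get_lis([]): A raises ValueError, B returns 0
-- crash fix: On the empty list A raises ValueError (max of empty dp) while B returns 0. — e.g. on get_lis([]): A raises ValueError, B returns 0
import Mathlib
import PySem

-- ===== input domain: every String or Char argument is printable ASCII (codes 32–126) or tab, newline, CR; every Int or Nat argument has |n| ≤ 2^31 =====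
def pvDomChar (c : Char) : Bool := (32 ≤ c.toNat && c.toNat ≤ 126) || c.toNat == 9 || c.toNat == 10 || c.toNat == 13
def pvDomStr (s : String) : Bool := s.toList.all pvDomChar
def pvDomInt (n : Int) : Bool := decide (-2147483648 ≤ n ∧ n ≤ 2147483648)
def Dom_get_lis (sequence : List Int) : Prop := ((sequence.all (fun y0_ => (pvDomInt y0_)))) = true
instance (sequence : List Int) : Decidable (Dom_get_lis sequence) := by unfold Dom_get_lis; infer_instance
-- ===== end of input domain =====

-- B replaces A's quadratic pair-loop DP with a single pass over the sequence keeping a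
-- dict value -> best chain length, looking up only v-1, v-2, v-3 per element (objective: faster).

-- ===== PORT A =====
def get_lis (sequence : List Int) : Int :=
  let n : Int := (sequence.length : Int)
  let dp : List Int := List.replicate sequence.length (1 : Int)
  let dp2 := (PySem.List.pyRange 1 n 1).foldl (fun dp i =>
    (PySem.List.pyRange 0 i 1).foldl (fun dp j =>
      let abs_distance := |PySem.List.pyGetD sequence i 0 - PySem.List.pyGetD sequence j 0|
      if PySem.List.pyGetD sequence j 0 < PySem.List.pyGetD sequence i 0 ∧
          1 ≤ abs_distance ∧ abs_distance ≤ 3 then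
        PySem.List.pySetD dp i (max (PySem.List.pyGetD dp i 0) (PySem.List.pyGetD dp j 0 + 1))
      else dp) dp) dp
  -- max(dp): ValueError (none) on the empty list is excluded by Pre_get_lis
  (PySem.List.max? dp2 (fun x => x)).getD 0

-- ===== PORT B =====
def get_lis_alt (sequence : List Int) : Int :=
  (sequence.foldl (fun (st : PySem.Dict Int Int × Int) v =>
    let best := st.1
    let d := max (max (best.getD (v - 1) 0) (best.getD (v - 2) 0)) (best.getD (v - 3) 0) + 1
    let nb := max (best.getD v 0) d
    (best.insert v nb, max st.2 nb)) ((PySem.Dict.empty : PySem.Dict Int Int), (0 : Int))).2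

-- ===== PRECONDITION & SPEC =====
-- Pre_ excludes exactly the empty list, on which A's max(dp) raises ValueError.
def Pre_get_lis (sequence : List Int) : Prop := sequence ≠ []
instance (sequence : List Int) : Decidable (Pre_get_lis sequence) := by
  unfold Pre_get_lis; infer_instance
def pvWitness_get_lis : List Int := [1, 2, 5, 3]

-- On the empty list A raises ValueError (max of empty dp) while B returns 0; see get_lis_raises at the bottom.
def Raises_get_lis (sequence : List Int) : Prop := sequence = []
instance (sequence : List Int) : Decidable (Raises_get_lis sequence) := by
  unfold Raises_get_lis; infer_instance
def pvRaiseWitness_get_lis : List Int := []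
def pvRaiseWitnessOut_get_lis : Int := 0

def Spec_get_lis (sequence : List Int) (out : Int) : Prop := out = get_lis_alt sequence
instance (sequence : List Int) (out : Int) : Decidable (Spec_get_lis sequence out) := by
  unfold Spec_get_lis; infer_instance

-- ===== CLAIM (what is proved, stated in full; the proofs are below) =====
def Claim_equal_get_lis : Prop := ∀ (sequence : List Int), Dom_get_lis sequence →
  Pre_get_lis sequence → Spec_get_lis sequence (get_lis sequence)
def Claim_raises_get_lis : Prop :=
  (∀ (sequence : List Int), Dom_get_lis sequence → Raises_get_lis sequence → ¬ Pre_get_lis sequence) ∧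
  (Dom_get_lis (pvRaiseWitness_get_lis) ∧ Raises_get_lis (pvRaiseWitness_get_lis) ∧
    get_lis_alt (pvRaiseWitness_get_lis) = pvRaiseWitnessOut_get_lis)

-- ===== LEMMAS AND PROOFS =====

-- Reference model: the list of (value, dp-value) pairs, built left to right.
def pvUpd (v m : Int) (q : Int × Int) : Int :=
  if v - 3 ≤ q.1 ∧ q.1 ≤ v - 1 then max m q.2 else m
def pvChain (acc : List (Int × Int)) (v : Int) : Int := acc.foldl (pvUpd v) 0
def pvStep (acc : List (Int × Int)) (v : Int) : List (Int × Int) :=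
  acc ++ [(v, pvChain acc v + 1)]
def pvExt (p : List (Int × Int)) (xs : List Int) : List (Int × Int) := xs.foldl pvStep p
def pvPairs (xs : List Int) : List (Int × Int) := pvExt [] xs
-- per-value max of dp-values, and global max
def pvG (u : Int) (m : Int) (q : Int × Int) : Int := if q.1 = u then max m q.2 else m
def pvMx (p : List (Int × Int)) (u : Int) : Int := p.foldl (pvG u) 0
def pvAns (p : List (Int × Int)) : Int := p.foldl (fun m q => max m q.2) 0
-- A's inner-loop value update (A's literal condition, and dp[j]+1 inside the max)
def pvAup (v m : Int) (q : Int × Int) : Int :=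
  if q.1 < v ∧ 1 ≤ |v - q.1| ∧ |v - q.1| ≤ 3 then max m (q.2 + 1) else m

theorem pvExt_append (p : List (Int × Int)) (xs : List Int) (v : Int) :
    pvExt p (xs ++ [v]) = pvStep (pvExt p xs) v := by
  simp [pvExt, List.foldl_append]

theorem length_pvExt (xs : List Int) (p : List (Int × Int)) :
    (pvExt p xs).length = p.length + xs.length := by
  induction xs generalizing p with
  | nil => simp [pvExt]
  | cons x t ih =>
      have h := ih (pvStep p x)
      simp only [pvExt] at h ⊢
      rw [List.foldl_cons, h]
      simp [pvStep]; omega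

theorem fst_pvExt (xs : List Int) (p : List (Int × Int)) :
    (pvExt p xs).map Prod.fst = p.map Prod.fst ++ xs := by
  induction xs generalizing p with
  | nil => simp [pvExt]
  | cons x t ih =>
      have h := ih (pvStep p x)
      simp only [pvExt] at h ⊢
      rw [List.foldl_cons, h]
      simp [pvStep]

theorem le_foldl_pvUpd (P : List (Int × Int)) (v c : Int) : c ≤ P.foldl (pvUpd v) c := by
  induction P generalizing c with
  | nil => simp
  | cons q t ih =>
      simp only [List.foldl_cons]
      refine le_trans ?_ (ih _)
      simp only [pvUpd]; split_ifs <;> omega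

theorem snd_pos_pvExt (xs : List Int) (p : List (Int × Int))
    (hp : ∀ q ∈ p, 1 ≤ q.2) : ∀ q ∈ pvExt p xs, 1 ≤ q.2 := by
  induction xs generalizing p with
  | nil => simpa [pvExt] using hp
  | cons x t ih =>
      simp only [pvExt, List.foldl_cons]
      refine ih (pvStep p x) ?_
      intro q hq
      rcases List.mem_append.1 hq with h | h
      · exact hp q h
      · simp at h; subst h
        have := le_foldl_pvUpd p x 0
        simpa [pvChain] using by omega

theorem pv_cond_iff (v u : Int) :
    (u < v ∧ 1 ≤ |v - u| ∧ |v - u| ≤ 3) ↔ (v - 3 ≤ u ∧ u ≤ v - 1) := by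
  rcases abs_cases (v - u) with ⟨h1, h2⟩ | ⟨h1, h2⟩ <;> omega

theorem pvAup_shift (P : List (Int × Int)) (v : Int) :
    ∀ c, P.foldl (pvAup v) (c + 1) = P.foldl (pvUpd v) c + 1 := by
  induction P with
  | nil => intro c; simp
  | cons q t ih =>
      intro c
      simp only [List.foldl_cons]
      have h : pvAup v (c + 1) q = pvUpd v c q + 1 := by
        simp only [pvAup, pvUpd]
        by_cases hq : v - 3 ≤ q.1 ∧ q.1 ≤ v - 1
        · rw [if_pos ((pv_cond_iff v q.1).mpr hq), if_pos hq]
          simp only [Int.max_def]; split_ifs <;> omega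
        · rw [if_neg (fun hc => hq ((pv_cond_iff v q.1).mp hc)), if_neg hq]
      rw [h, ih]

theorem pv_decomp (P : List (Int × Int)) (v : Int) :
    ∀ a b c, P.foldl (pvUpd v) (max (max a b) c) =
      max (max (P.foldl (pvG (v - 1)) a) (P.foldl (pvG (v - 2)) b)) (P.foldl (pvG (v - 3)) c) := by
  induction P with
  | nil => intro a b c; simp
  | cons q t ih =>
      intro a b c
      simp only [List.foldl_cons]
      have h : pvUpd v (max (max a b) c) q =
          max (max (pvG (v - 1) a q) (pvG (v - 2) b q)) (pvG (v - 3) c q) := by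
        simp only [pvUpd, pvG]
        by_cases h1 : q.1 = v - 1
        · rw [if_pos (by omega : v - 3 ≤ q.1 ∧ q.1 ≤ v - 1), if_pos h1,
            if_neg (by omega : ¬ q.1 = v - 2), if_neg (by omega : ¬ q.1 = v - 3)]
          simp only [Int.max_def]; split_ifs <;> omega
        · by_cases h2 : q.1 = v - 2
          · rw [if_pos (by omega : v - 3 ≤ q.1 ∧ q.1 ≤ v - 1), if_neg h1, if_pos h2,
              if_neg (by omega : ¬ q.1 = v - 3)]
            simp only [Int.max_def]; split_ifs <;> omega
          · by_cases h3 : q.1 = v - 3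
            · rw [if_pos (by omega : v - 3 ≤ q.1 ∧ q.1 ≤ v - 1), if_neg h1, if_neg h2,
                if_pos h3]
              simp only [Int.max_def]; split_ifs <;> omega
            · rw [if_neg (by omega : ¬ (v - 3 ≤ q.1 ∧ q.1 ≤ v - 1)), if_neg h1, if_neg h2,
                if_neg h3]
      rw [h, ih]

theorem pvMx_append (p : List (Int × Int)) (q : Int × Int) (u : Int) :
    pvMx (p ++ [q]) u = if q.1 = u then max (pvMx p u) q.2 else pvMx p u := by
  simp [pvMx, List.foldl_append, pvG]

theorem pvAns_append (p : List (Int × Int)) (q : Int × Int) :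
    pvAns (p ++ [q]) = max (pvAns p) q.2 := by
  simp [pvAns, List.foldl_append]

theorem pvMx_le_pvAns (p : List (Int × Int)) (u : Int) :
    ∀ a b : Int, a ≤ b →
      p.foldl (pvG u) a ≤ p.foldl (fun m q => max m q.2) b := by
  induction p with
  | nil => intro a b h; simpa using h
  | cons q t ih =>
      intro a b h
      simp only [List.foldl_cons]
      refine ih _ _ ?_
      simp only [pvG]; split_ifs <;> simp only [Int.max_def] <;> split_ifs <;> omega

theorem pv_B_loop (xs : List Int) :
    ∀ (best : PySem.Dict Int Int) (ans : Int) (p : List (Int × Int)),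
      (∀ u, best.getD u 0 = pvMx p u) → ans = pvAns p →
      (xs.foldl (fun (st : PySem.Dict Int Int × Int) v =>
        let best := st.1
        let d := max (max (best.getD (v - 1) 0) (best.getD (v - 2) 0)) (best.getD (v - 3) 0) + 1
        let nb := max (best.getD v 0) d
        (best.insert v nb, max st.2 nb)) (best, ans)).2 = pvAns (pvExt p xs) := by
  induction xs with
  | nil => intro best ans p hb ha; simpa [pvExt] using ha
  | cons v t ih =>
      intro best ans p hb ha
      simp only [List.foldl_cons]
      have hd : max (max (best.getD (v - 1) 0) (best.getD (v - 2) 0)) (best.getD (v - 3) 0) + 1 =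
          pvChain p v + 1 := by
        rw [hb, hb, hb, pvChain]
        have := pv_decomp p v 0 0 0
        simp only [max_self] at this
        rw [this]; rfl
      set dv : Int := pvChain p v + 1 with hdv
      have hstep : pvExt p (v :: t) = pvExt (p ++ [(v, dv)]) t := by
        simp [pvExt, pvStep, hdv]
      rw [hstep]
      refine ih _ _ (p ++ [(v, dv)]) ?_ ?_
      · intro u
        rw [PySem.Dict.getD_insert, pvMx_append]
        by_cases h : u = v
        · subst h; rw [if_pos rfl, if_pos rfl, hd, hb]
        · rw [if_neg h, if_neg (fun (h' : v = u) => h h'.symm), hb]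
      · rw [pvAns_append]
        simp only [hd, ha]
        have hle : pvMx p v ≤ pvAns p := pvMx_le_pvAns p v 0 0 le_rfl
        rw [hb]
        simp only [Int.max_def]; split_ifs <;> omega

theorem pv_B_eq (xs : List Int) : get_lis_alt xs = pvAns (pvPairs xs) := by
  unfold get_lis_alt pvPairs
  exact pv_B_loop xs PySem.Dict.empty 0 [] (fun u => by simp [pvMx, PySem.Dict.getD_empty]) rfl

-- middle-of-list access for A's dp array
theorem pv_getMid (A : List Int) (c : Int) (B : List Int) :
    PySem.List.pyGetD (A ++ c :: B) ((A.length : Nat) : Int) 0 = c := by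
  simp [PySem.List.pyGetD_natCast, List.getD]

theorem pv_getLeft (A : List Int) (c : Int) (B : List Int) (k : Nat) (hk : k < A.length) :
    PySem.List.pyGetD (A ++ c :: B) ((k : Nat) : Int) 0 = A[k] := by
  simp [PySem.List.pyGetD_natCast, List.getD, List.getElem?_append_left hk,
    List.getElem?_eq_getElem hk]

theorem pv_setMid (A : List Int) (c : Int) (B : List Int) (w : Int) :
    PySem.List.pySetD (A ++ c :: B) ((A.length : Nat) : Int) w = A ++ w :: B := by
  rw [PySem.List.pySetD_natCast]
  rw [List.set_append_right _ _ (le_refl A.length)]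
  simp

theorem pv_innerA_go (xs : List Int) (i : Nat) (hi : i < xs.length)
    (P : List (Int × Int)) (hlen : P.length = i)
    (hfst : ∀ (k : Nat) (hk : k < i), (P[k]'(by omega)).1 = xs[k]'(by omega))
    (B : List Int) :
    ∀ (k : Nat), k ≤ i → ∀ c : Int,
      (PySem.List.pyRange 0 (k : Int) 1).foldl (fun dp j =>
        let abs_distance := |PySem.List.pyGetD xs (i : Int) 0 - PySem.List.pyGetD xs j 0|
        if PySem.List.pyGetD xs j 0 < PySem.List.pyGetD xs (i : Int) 0 ∧
            1 ≤ abs_distance ∧ abs_distance ≤ 3 then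
          PySem.List.pySetD dp (i : Int)
            (max (PySem.List.pyGetD dp (i : Int) 0) (PySem.List.pyGetD dp j 0 + 1))
        else dp) (P.map Prod.snd ++ c :: B)
      = P.map Prod.snd ++ ((P.take k).foldl (pvAup (xs[i]'hi)) c) :: B := by
  intro k
  induction k with
  | zero => intro _ c; simp [PySem.List.pyRange_one_eq_nil]
  | succ k ihk =>
      intro hk1 c
      have hk : k ≤ i := by omega
      have hkP : k < P.length := by omega
      have hrange : PySem.List.pyRange 0 ((k + 1 : Nat) : Int) 1 =
          PySem.List.pyRange 0 (k : Int) 1 ++ [(k : Int)] := by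
        push_cast
        exact PySem.List.pyRange_one_succ_right (by positivity)
      rw [hrange, List.foldl_append, ihk hk c]
      have hPmLen : (P.map Prod.snd).length = i := by simp [hlen]
      set c' : Int := (P.take k).foldl (pvAup (xs[i]'hi)) c with hc'
      have hgi : PySem.List.pyGetD xs ((i : Nat) : Int) 0 = xs[i]'hi := by
        simp [PySem.List.pyGetD_natCast, List.getD, List.getElem?_eq_getElem hi]
      have hgk : PySem.List.pyGetD xs ((k : Nat) : Int) 0 = (P[k]'hkP).1 := by
        rw [hfst k (by omega)]
        simp [PySem.List.pyGetD_natCast, List.getD,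
          List.getElem?_eq_getElem (show k < xs.length by omega)]
      have hmid : PySem.List.pyGetD (P.map Prod.snd ++ c' :: B) ((i : Nat) : Int) 0 = c' := by
        rw [← hPmLen]; exact pv_getMid _ _ _
      have hleft : PySem.List.pyGetD (P.map Prod.snd ++ c' :: B) ((k : Nat) : Int) 0 =
          (P[k]'hkP).2 := by
        rw [pv_getLeft _ _ _ k (by omega)]
        simp
      have hset : ∀ w, PySem.List.pySetD (P.map Prod.snd ++ c' :: B) ((i : Nat) : Int) w =
          P.map Prod.snd ++ w :: B := by
        intro w; rw [← hPmLen]; exact pv_setMid _ _ _ _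
      have htake : P.take (k + 1) = P.take k ++ [P[k]'hkP] := by
        rw [List.take_add_one]; simp [List.getElem?_eq_getElem hkP]
      rw [htake, List.foldl_append]
      simp only [List.foldl_cons, List.foldl_nil, ← hc']
      simp only [hgi, hgk, hmid, hleft, pvAup]
      split_ifs with h
      · rw [hset]
      · rfl

theorem pv_outerA (xs : List Int) (x0 : Int) (t0 : List Int) (hxs : xs = x0 :: t0) :
    ∀ (k : Nat), 1 ≤ k → k ≤ xs.length →
      (PySem.List.pyRange 1 (k : Int) 1).foldl (fun dp i =>
        (PySem.List.pyRange 0 i 1).foldl (fun dp j =>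
          let abs_distance := |PySem.List.pyGetD xs i 0 - PySem.List.pyGetD xs j 0|
          if PySem.List.pyGetD xs j 0 < PySem.List.pyGetD xs i 0 ∧
              1 ≤ abs_distance ∧ abs_distance ≤ 3 then
            PySem.List.pySetD dp i
              (max (PySem.List.pyGetD dp i 0) (PySem.List.pyGetD dp j 0 + 1))
          else dp) dp) (List.replicate xs.length 1)
      = (pvPairs (xs.take k)).map Prod.snd ++ List.replicate (xs.length - k) 1 := by
  intro k hk1 hk
  induction k with
  | zero => omega
  | succ k ihk =>
      by_cases hk0 : k = 0
      · subst hk0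
        have : PySem.List.pyRange 1 ((1 : Nat) : Int) 1 = [] := by
          simpa using PySem.List.pyRange_one_eq_nil (le_refl (1 : Int))
        rw [this, List.foldl_nil]
        have htake : xs.take 1 = [x0] := by simp [hxs]
        have hpp : pvPairs [x0] = [(x0, 1)] := rfl
        rw [htake, hpp]
        simp [hxs, List.replicate_succ]
      · have hk1' : 1 ≤ k := by omega
        have hkl : k < xs.length := by omega
        have hrange : PySem.List.pyRange 1 ((k + 1 : Nat) : Int) 1 =
            PySem.List.pyRange 1 (k : Int) 1 ++ [(k : Int)] := by
          push_cast
          exact PySem.List.pyRange_one_succ_right (by exact_mod_cast hk1')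
        rw [hrange, List.foldl_append, ihk hk1' (by omega)]
        set P : List (Int × Int) := pvPairs (xs.take k) with hP
        have hPlen : P.length = k := by
          simp [hP, pvPairs, length_pvExt, List.length_take, min_eq_left (le_of_lt hkl)]
        have hPfst : ∀ (j : Nat) (hj : j < k), (P[j]'(by omega)).1 = xs[j]'(by omega) := by
          intro j hj
          have hmap : P.map Prod.fst = xs.take k := by
            simpa [pvPairs] using fst_pvExt (xs.take k) []
          have e1 : (P.map Prod.fst)[j]? = (xs.take k)[j]? := by rw [hmap]
          rw [List.getElem?_eq_getElem (by simp [hPlen]; omega),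
            List.getElem?_eq_getElem (by rw [List.length_take]; omega)] at e1
          have e2 := Option.some.inj e1
          simp only [List.getElem_map] at e2
          rw [e2]
          simp
        have hrep : List.replicate (xs.length - k) (1 : Int) =
            1 :: List.replicate (xs.length - (k + 1)) 1 := by
          have : xs.length - k = (xs.length - (k + 1)) + 1 := by omega
          rw [this, List.replicate_succ]
        rw [hrep]
        have := pv_innerA_go xs k hkl P hPlen hPfst
          (List.replicate (xs.length - (k + 1)) 1) k (le_refl k) 1
        simp only [List.foldl] at this ⊢
        rw [this]
        have htk : P.take k = P := List.take_of_length_le (by omega)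
        rw [htk]
        have hfold : P.foldl (pvAup (xs[k]'hkl)) 1 = pvChain P (xs[k]'hkl) + 1 := by
          have := pvAup_shift P (xs[k]'hkl) 0
          simpa [pvChain] using this
        rw [hfold]
        have htake1 : xs.take (k + 1) = xs.take k ++ [xs[k]'hkl] := by
          rw [List.take_add_one]; simp [List.getElem?_eq_getElem hkl]
        have hpp : pvPairs (xs.take (k + 1)) = P ++ [(xs[k]'hkl, pvChain P (xs[k]'hkl) + 1)] := by
          rw [htake1]
          simpa [pvStep, hP, pvPairs] using pvExt_append [] (xs.take k) (xs[k]'hkl)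
        rw [hpp]
        simp

theorem pvAns_eq_map_snd (p : List (Int × Int)) :
    pvAns p = (p.map Prod.snd).foldl max 0 := by
  simp [pvAns, List.foldl_map]

theorem pv_A_eq (xs : List Int) (hne : xs ≠ []) : get_lis xs = pvAns (pvPairs xs) := by
  obtain ⟨x0, t0, hxs⟩ := List.exists_cons_of_ne_nil hne
  unfold get_lis
  simp only []
  have hlen1 : 1 ≤ xs.length := by simp [hxs]
  have houter := pv_outerA xs x0 t0 hxs xs.length hlen1 (le_refl _)
  rw [houter]
  rw [List.take_of_length_le (le_refl xs.length), Nat.sub_self, List.replicate_zero,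
    List.append_nil]
  have hsnd : ∀ q ∈ pvPairs xs, 1 ≤ q.2 := snd_pos_pvExt xs [] (by simp)
  have hlenp : (pvPairs xs).length = xs.length := by
    simpa [pvPairs] using length_pvExt xs []
  obtain ⟨m, t, hmt⟩ : ∃ m t, (pvPairs xs).map Prod.snd = m :: t := by
    cases h : (pvPairs xs).map Prod.snd with
    | nil =>
        exfalso
        have hl := congrArg List.length h
        simp only [List.length_map, List.length_nil] at hl
        rw [hlenp] at hl
        simp [hxs] at hl
    | cons m t => exact ⟨m, t, rfl⟩
  rw [hmt, PySem.List.max?_id_cons]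
  have hm1 : 1 ≤ m := by
    have hm : m ∈ (pvPairs xs).map Prod.snd := by rw [hmt]; exact List.mem_cons_self
    obtain ⟨q, hq, hq2⟩ := List.mem_map.1 hm
    rw [← hq2]; exact hsnd q hq
  rw [pvAns_eq_map_snd, hmt]
  simp only [List.foldl_cons, Option.getD_some]
  rw [max_eq_right (by omega)]

-- ===== VERDICT (by name: the statement is the Claim_ definition above) =====
theorem get_lis_spec : Claim_equal_get_lis := by
  intro xs _ hpre
  unfold Spec_get_lis
  rw [pv_A_eq xs hpre, pv_B_eq xs]

@[simp] theorem get_lis_raises : Claim_raises_get_lis := by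
  unfold Claim_raises_get_lis
  exact ⟨fun xs _ hr hp => hp hr, by decide⟩
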